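-- pv_equiv track=rewrite | github.com/5pponent/opponent | greedy&simulaion/피로도.py | solution
-- ===== SOURCE A (Python) =====
-- import itertools
--
-- def solution(k, dungeons):
--     total = 0
--
--     for data in list(itertools.permutations(dungeons, len(dungeons))):
--         tmp = k
--         count = 0
--
--         for item in data:
--             if (tmp >= item[0]):
--                 tmp -= item[1]
--                 count += 1
--             total = max(total, count)
--
--     return total
-- ===== SOURCE B (Python) =====
-- def solution(k, dungeons):
--     n = len(dungeons)
--     reach = [False] * (1 << n)
--     reach[0] = True
--     best = 0
--     for mask in range(1 << n):
--         if reach[mask]: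
--             cleared = bin(mask).count("1")
--             if cleared > best:
--                 best = cleared
--             fatigue = k
--             for j, item in enumerate(dungeons):
--                 if mask >> j & 1:
--                     fatigue -= item[1]
--             for i, item in enumerate(dungeons):
--                 if not (mask >> i & 1) and fatigue >= item[0]:
--                     reach[mask | (1 << i)] = True
--     return best
-- ===== Notes on version B (the rewrite author's own statement) =====
-- stated objective: faster
-- what changed: Replaced A's enumeration of all n! permutations (simulating each) with a bitmask dynamic program over subsets: a subset is reachable iff it extends a smaller reachable subset whose remaining fatigue admits the new dungeon, and the answer is the largest popcount of a reachable subset.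
import Mathlib
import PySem

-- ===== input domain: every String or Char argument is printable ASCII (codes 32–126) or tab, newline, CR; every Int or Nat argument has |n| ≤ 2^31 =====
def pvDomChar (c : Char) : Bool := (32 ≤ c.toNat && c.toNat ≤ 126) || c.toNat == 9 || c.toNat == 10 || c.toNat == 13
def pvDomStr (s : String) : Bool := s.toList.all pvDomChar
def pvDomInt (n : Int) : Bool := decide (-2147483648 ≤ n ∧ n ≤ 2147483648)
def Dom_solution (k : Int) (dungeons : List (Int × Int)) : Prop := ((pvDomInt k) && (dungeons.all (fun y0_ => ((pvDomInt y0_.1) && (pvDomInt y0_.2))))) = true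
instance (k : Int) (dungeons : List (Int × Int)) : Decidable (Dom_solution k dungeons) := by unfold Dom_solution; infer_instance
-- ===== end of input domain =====

-- B replaces A's enumeration of all n! permutations with a bitmask dynamic program over subsets
-- (reachable cleared-sets; answer = largest popcount of a reachable subset) — asymptotically faster.

-- ===== PORT A =====
-- all (element, list-with-that-element-removed) decompositions, in index order
def picks {α : Type} : List α → List (α × List α)
  | [] => []
  | x :: xs => (x, xs) :: (picks xs).map (fun p => (p.1, x :: p.2))

theorem picks_mem_length {α : Type} : ∀ {ds : List α} {p : α × List α},
    p ∈ picks ds → p.2.length + 1 = ds.length := by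
  intro ds
  induction ds with
  | nil => intro p h; simp [picks] at h
  | cons x xs ih =>
    intro p h
    simp only [picks, List.mem_cons, List.mem_map] at h
    rcases h with h | ⟨q, hq, rfl⟩
    · subst h; simp
    · have := ih hq; simp; omega

-- itertools.permutations(dungeons, len(dungeons)): all permutations, first index chosen in order
def permsA : List (Int × Int) → List (List (Int × Int))
  | [] => [[]]
  | x :: xs =>
    (picks (x :: xs)).attach.flatMap (fun p => (permsA p.1.2).map (p.1.1 :: ·))
termination_by ds => ds.length
decreasing_by have := picks_mem_length p.2; simp at this ⊢; omega

-- one step of A's inner loop on state (tmp, count, total)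
def stepA (st : Int × Int × Int) (item : Int × Int) : Int × Int × Int :=
  if st.1 ≥ item.1 then (st.1 - item.2, st.2.1 + 1, max st.2.2 (st.2.1 + 1))
  else (st.1, st.2.1, max st.2.2 st.2.1)

def solution (k : Int) (dungeons : List (Int × Int)) : Int :=
  (permsA dungeons).foldl (fun total data => (data.foldl stepA (k, 0, total)).2.2) 0

-- ===== PORT B =====
-- bin(mask).count("1")
def popcnt : Nat → Nat
  | 0 => 0
  | (n+1) => (n+1) % 2 + popcnt ((n+1) / 2)
decreasing_by omega

-- the body of Source B's `for mask in range(1 << n)` loop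
def altStep (k : Int) (dungeons : List (Int × Int)) (st : List Bool × Int) (mask : Nat) : List Bool × Int :=
  if st.1.getD mask false = true then
    let best := if (popcnt mask : Int) > st.2 then (popcnt mask : Int) else st.2
    let fatigue := dungeons.zipIdx.foldl (fun f di => if mask.testBit di.2 then f - di.1.2 else f) k
    (dungeons.zipIdx.foldl
      (fun r di => if mask.testBit di.2 = false ∧ di.1.1 ≤ fatigue then r.set (mask ||| (1 <<< di.2)) true else r)
      st.1,
     best)
  else st

def solution_alt (k : Int) (dungeons : List (Int × Int)) : Int :=
  ((List.range (2 ^ dungeons.length)).foldl (altStep k dungeons)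
    ((List.replicate (2 ^ dungeons.length) false).set 0 true, 0)).2

-- ===== PRECONDITION & SPEC =====
def Spec_solution (k : Int) (dungeons : List (Int × Int)) (out : Int) : Prop := out = solution_alt k dungeons
instance (k : Int) (dungeons : List (Int × Int)) (out : Int) : Decidable (Spec_solution k dungeons out) := by unfold Spec_solution; infer_instance

-- ===== CLAIM (what is proved, stated in full; the proofs are below) =====
def Claim_equal_solution : Prop := ∀ (k : Int) (dungeons : List (Int × Int)), Dom_solution k dungeons → Spec_solution k dungeons (solution k dungeons)

-- ===== LEMMAS AND PROOFS =====

-- ---------- generic foldl-max machinery (for A's outer loop) ----------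
theorem foldlMax_init_le {α : Type} (g : α → Int) :
    ∀ (l : List α) (t : Int), t ≤ l.foldl (fun b p => max b (g p)) t := by
  intro l
  induction l with
  | nil => intro t; simp
  | cons a l ih => intro t; exact le_trans (le_max_left _ _) (ih _)

theorem foldlMax_elem_le {α : Type} (g : α → Int) :
    ∀ (l : List α) (t : Int) (p : α), p ∈ l → g p ≤ l.foldl (fun b q => max b (g q)) t := by
  intro l
  induction l with
  | nil => intro t p h; simp at h
  | cons a l ih =>
    intro t p h
    rcases List.mem_cons.mp h with rfl | h
    · exact le_trans (le_max_right _ _) (foldlMax_init_le g l _)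
    · exact ih _ p h

theorem foldlMax_le {α : Type} (g : α → Int) {bound : Int} :
    ∀ (l : List α) (t : Int), t ≤ bound → (∀ p ∈ l, g p ≤ bound) →
      l.foldl (fun b q => max b (g q)) t ≤ bound := by
  intro l
  induction l with
  | nil => intro t ht _; simpa using ht
  | cons a l ih =>
    intro t ht h
    exact ih _ (max_le ht (h a (List.mem_cons_self))) (fun p hp => h p (List.mem_cons_of_mem _ hp))

-- ---------- A's inner simulation ----------
def runC : Int → List (Int × Int) → Int
  | _, [] => 0
  | k, d :: rest => if k ≥ d.1 then 1 + runC (k - d.2) rest else runC k rest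

theorem runC_nonneg : ∀ (data : List (Int × Int)) (k : Int), 0 ≤ runC k data := by
  intro data
  induction data with
  | nil => intro k; simp [runC]
  | cons d rest ih => intro k; simp only [runC]; split <;> [linarith [ih (k - d.2)]; exact ih k]

-- feasible clearing sequences
def Feas : Int → List (Int × Int) → Prop
  | _, [] => True
  | k, d :: s => k ≥ d.1 ∧ Feas (k - d.2) s

theorem feas_le_runC_append : ∀ (s : List (Int × Int)) (k : Int) (l : List (Int × Int)),
    Feas k s → (s.length : Int) ≤ runC k (s ++ l) := by
  intro s
  induction s with
  | nil => intro k l _; simpa using runC_nonneg l k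
  | cons d q ih =>
    intro k l h
    obtain ⟨h1, h2⟩ := h
    have := ih (k - d.2) l h2
    simp only [List.cons_append, runC, if_pos h1, List.length_cons]
    push_cast
    omega

theorem runC_cleared : ∀ (data : List (Int × Int)) (k : Int),
    ∃ s, s.Sublist data ∧ Feas k s ∧ (s.length : Int) = runC k data := by
  intro data
  induction data with
  | nil => intro k; exact ⟨[], List.Sublist.refl _, trivial, by simp [runC]⟩
  | cons d rest ih =>
    intro k
    by_cases h : k ≥ d.1
    · obtain ⟨s, hs, hf, hl⟩ := ih (k - d.2)
      exact ⟨d :: s, List.Sublist.cons₂ _ hs, ⟨h, hf⟩, by simp only [runC, if_pos h, List.length_cons]; push_cast; omega⟩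
    · obtain ⟨s, hs, hf, hl⟩ := ih k
      exact ⟨s, List.Sublist.cons _ hs, hf, by simp [runC, if_neg h]; exact hl⟩

theorem picks_mem_perm {α : Type} : ∀ {ds : List α} {e : α} {r : List α},
    (e, r) ∈ picks ds → (e :: r).Perm ds := by
  intro ds
  induction ds with
  | nil => intro e r h; simp [picks] at h
  | cons x xs ih =>
    intro e r h
    simp only [picks, List.mem_cons, List.mem_map] at h
    rcases h with h | ⟨q, hq, hqe⟩
    · rw [Prod.mk.injEq] at h; rw [h.1, h.2]
    · rw [Prod.mk.injEq] at hqe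
      obtain ⟨rfl, rfl⟩ := And.intro hqe.1.symm hqe.2.symm
      have h1 : (q.1 :: q.2).Perm xs := ih (by simpa using hq)
      exact (List.Perm.swap x q.1 q.2).trans (List.Perm.cons x h1)

theorem mem_picks_of_mem {ds : List (Int × Int)} {d : Int × Int} (h : d ∈ ds) :
    (d, ds.erase d) ∈ picks ds := by
  induction ds with
  | nil => simp at h
  | cons x xs ih =>
    by_cases hx : x = d
    · subst hx; simp [picks, List.erase_cons_head]
    · rcases List.mem_cons.mp h with rfl | h2
      · exact absurd rfl hx
      · have he : (x :: xs).erase d = x :: xs.erase d :=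
          List.erase_cons_tail (by simp [hx])
        rw [he]
        exact List.mem_cons_of_mem _ (List.mem_map.mpr ⟨(d, xs.erase d), ih h2, rfl⟩)

theorem perm_of_mem_permsA : ∀ (n : Nat) (ds data : List (Int × Int)), ds.length ≤ n →
    data ∈ permsA ds → data.Perm ds := by
  intro n
  induction n with
  | zero =>
    intro ds data hn h
    have hds : ds = [] := by cases ds with | nil => rfl | cons a l => simp at hn
    subst hds
    simp [permsA] at h
    simp [h]
  | succ n ih =>
    intro ds data hn h
    cases ds with
    | nil => simp [permsA] at h; simp [h]
    | cons x xs =>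
      rw [permsA] at h
      simp only [List.mem_flatMap, List.mem_map] at h
      obtain ⟨p, _, q, hq, hqd⟩ := h
      have hpl := picks_mem_length p.2
      have hlen : p.1.2.length ≤ n := by simp at hpl hn; omega
      have hqp : q.Perm p.1.2 := ih p.1.2 q hlen hq
      rw [← hqd]
      exact (hqp.cons p.1.1).trans (picks_mem_perm (by simpa using p.2))

theorem mem_permsA_of_perm : ∀ (n : Nat) (ds data : List (Int × Int)), ds.length ≤ n →
    data.Perm ds → data ∈ permsA ds := by
  intro n
  induction n with
  | zero =>
    intro ds data hn h
    have hds : ds = [] := by cases ds with | nil => rfl | cons a l => simp at hn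
    subst hds
    have : data = [] := List.perm_nil.mp h
    simp [permsA, this]
  | succ n ih =>
    intro ds data hn h
    cases ds with
    | nil =>
      have : data = [] := List.perm_nil.mp h
      simp [permsA, this]
    | cons x xs =>
      cases data with
      | nil => have := h.length_eq; simp at this
      | cons d q =>
        have hd : d ∈ x :: xs := h.subset List.mem_cons_self
        have hperm : (x :: xs).Perm (d :: (x :: xs).erase d) := List.perm_cons_erase hd
        have hq : q.Perm ((x :: xs).erase d) := (h.trans hperm).cons_inv
        have hlen : ((x :: xs).erase d).length ≤ n := by
          rw [List.length_erase_of_mem hd]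
          simp only [List.length_cons] at hn ⊢
          omega
        have hqmem := ih _ q hlen hq
        rw [permsA]
        simp only [List.mem_flatMap, List.mem_map]
        exact ⟨⟨(d, (x :: xs).erase d), mem_picks_of_mem hd⟩, List.mem_attach _ _,
          q, hqmem, rfl⟩

theorem foldA_eval : ∀ (data : List (Int × Int)) (k count total : Int), count ≤ total →
    (data.foldl stepA (k, count, total)).2.2 = max total (count + runC k data) := by
  intro data
  induction data with
  | nil =>
    intro k count total h
    simp only [List.foldl_nil, runC]
    omega
  | cons d rest ih =>
    intro k count total h
    simp only [List.foldl_cons, stepA, runC]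
    by_cases hc : k ≥ d.1
    · rw [if_pos hc, if_pos hc]
      have := runC_nonneg rest (k - d.2)
      rw [ih (k - d.2) (count + 1) (max total (count + 1)) (le_max_right _ _)]
      omega
    · rw [if_neg hc, if_neg hc]
      rw [max_eq_left h]
      exact ih k count total h

theorem outer_eval : ∀ (l : List (List (Int × Int))) (k t : Int), 0 ≤ t →
    l.foldl (fun total data => (data.foldl stepA (k, 0, total)).2.2) t
      = l.foldl (fun total data => max total (runC k data)) t := by
  intro l
  induction l with
  | nil => intro k t _; rfl
  | cons a l ih =>
    intro k t ht
    simp only [List.foldl_cons]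
    rw [foldA_eval a k 0 t ht, zero_add]
    exact ih k _ (le_trans ht (le_max_left _ _))

-- ---------- B-side: subsets selected by a bitmask ----------
-- elements of ds at the indices of the set bits of m (bit 0 = head)
def sel : Nat → List (Int × Int) → List (Int × Int)
  | _, [] => []
  | m, d :: rest => if m % 2 = 1 then d :: sel (m / 2) rest else sel (m / 2) rest

def costSum (m : Nat) (ds : List (Int × Int)) : Int := ((sel m ds).map Prod.snd).sum

def costs (s : List (Int × Int)) : Int := (s.map Prod.snd).sum

-- reachable cleared-subsets, exactly Source B's propagation rule
inductive ReachP (k : Int) (ds : List (Int × Int)) : Nat → Prop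
  | zero : ReachP k ds 0
  | step (p i : Nat) : ReachP k ds p → i < ds.length → p.testBit i = false →
      (ds.getD i (0, 0)).1 ≤ k - costSum p ds → ReachP k ds (p ||| (1 <<< i))

theorem popcnt_eq (m : Nat) : popcnt m = m % 2 + popcnt (m / 2) := by
  cases m with
  | zero => simp [popcnt]
  | succ n => simp [popcnt]

theorem sel_zero : ∀ (ds : List (Int × Int)), sel 0 ds = [] := by
  intro ds; induction ds with
  | nil => rfl
  | cons d rest ih => simp [sel, ih]

theorem sel_sublist : ∀ (ds : List (Int × Int)) (m : Nat), (sel m ds).Sublist ds := by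
  intro ds
  induction ds with
  | nil => intro m; simp [sel]
  | cons d rest ih =>
    intro m
    simp only [sel]
    split
    · exact List.Sublist.cons₂ _ (ih _)
    · exact List.Sublist.cons _ (ih _)

theorem sel_eq_nil : ∀ (ds : List (Int × Int)) (m : Nat), m < 2 ^ ds.length → sel m ds = [] → m = 0 := by
  intro ds
  induction ds with
  | nil => intro m hm _; simpa using hm
  | cons d rest ih =>
    intro m hm h
    simp only [sel] at h
    split at h
    · exact absurd h (by simp)
    · have h2 : 2 ^ (d :: rest).length = 2 * 2 ^ rest.length := by
        simp [List.length_cons, pow_succ]; ring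
      have := ih (m / 2) (by omega) h
      omega

theorem mem_sel : ∀ (ds : List (Int × Int)) (m : Nat) (d : Int × Int), d ∈ sel m ds →
    ∃ i, i < ds.length ∧ m.testBit i = true ∧ ds.getD i (0, 0) = d := by
  intro ds
  induction ds with
  | nil => intro m d h; simp [sel] at h
  | cons x rest ih =>
    intro m d h
    simp only [sel] at h
    by_cases hm : m % 2 = 1
    · rw [if_pos hm] at h
      rcases List.mem_cons.mp h with rfl | h2
      · exact ⟨0, by simp, by simp [Nat.testBit_zero, hm], rfl⟩
      · obtain ⟨i, hi, hb, hg⟩ := ih _ _ h2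
        exact ⟨i + 1, by simpa using hi, by rw [Nat.testBit_succ]; exact hb, by simpa using hg⟩
    · rw [if_neg hm] at h
      obtain ⟨i, hi, hb, hg⟩ := ih _ _ h
      exact ⟨i + 1, by simpa using hi, by rw [Nat.testBit_succ]; exact hb, by simpa using hg⟩

theorem popcnt_sel : ∀ (ds : List (Int × Int)) (m : Nat), m < 2 ^ ds.length →
    popcnt m = (sel m ds).length := by
  intro ds
  induction ds with
  | nil =>
    intro m hm
    have : m = 0 := by simpa using hm
    simp [this, popcnt, sel]
  | cons d rest ih =>
    intro m hm
    have h2 : 2 ^ (d :: rest).length = 2 * 2 ^ rest.length := by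
      simp [List.length_cons, pow_succ]; ring
    have := ih (m / 2) (by omega)
    rw [popcnt_eq]
    simp only [sel]
    split
    · simp only [List.length_cons]; omega
    · omega

-- bit arithmetic helpers
theorem or_one_mod (m : Nat) (h : m.testBit 0 = false) : (m ||| 1) % 2 = 1 ∧ m % 2 = 0 := by
  have h0 : (m ||| 1).testBit 0 = true := by
    rw [Nat.testBit_or]; simp [Nat.testBit_zero]
  rw [Nat.testBit_zero] at h0 h
  have h1 := of_decide_eq_true h0
  have h2 := of_decide_eq_false h
  omega

theorem or_one_div (m : Nat) : (m ||| 1) / 2 = m / 2 := by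
  apply Nat.eq_of_testBit_eq
  intro j
  rw [Nat.testBit_div_two, Nat.testBit_div_two, Nat.testBit_or]
  have : (1 : Nat).testBit (j + 1) = false := by
    have : (1 : Nat) = 2 ^ 0 := rfl
    rw [this, Nat.testBit_two_pow]
    simp
  rw [this, Bool.or_false]

theorem or_pow_succ_mod (m i : Nat) : (m ||| 2 ^ (i + 1)) % 2 = m % 2 := by
  have h0 : (m ||| 2 ^ (i + 1)).testBit 0 = m.testBit 0 := by
    rw [Nat.testBit_or, Nat.testBit_two_pow]
    simp
  rw [Nat.testBit_zero, Nat.testBit_zero] at h0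
  have h1 := decide_eq_decide.mp h0
  omega

theorem or_pow_succ_div (m i : Nat) : (m ||| 2 ^ (i + 1)) / 2 = m / 2 ||| 2 ^ i := by
  apply Nat.eq_of_testBit_eq
  intro j
  rw [Nat.testBit_div_two, Nat.testBit_or, Nat.testBit_or, Nat.testBit_div_two,
    Nat.testBit_two_pow, Nat.testBit_two_pow]
  congr 1
  simp

theorem lt_or_bit (p i : Nat) (h : p.testBit i = false) : p < p ||| (1 <<< i) := by
  rw [Nat.one_shiftLeft]
  apply Nat.lt_of_testBit i h
  · rw [Nat.testBit_or, h, Nat.testBit_two_pow]; simp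
  · intro j hj
    rw [Nat.testBit_or, Nat.testBit_two_pow]
    have : decide (i = j) = false := by simp; omega
    rw [this, Bool.or_false]

theorem xor_bit_false (m i : Nat) (h : m.testBit i = true) : (m ^^^ 2 ^ i).testBit i = false := by
  rw [Nat.testBit_xor, h, Nat.testBit_two_pow]
  simp

theorem xor_bit_or (m i : Nat) (h : m.testBit i = true) : (m ^^^ 2 ^ i) ||| 2 ^ i = m := by
  apply Nat.eq_of_testBit_eq
  intro j
  rw [Nat.testBit_or, Nat.testBit_xor, Nat.testBit_two_pow]
  by_cases hij : i = j
  · subst hij; simp [h]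
  · simp [hij]

theorem xor_bit_lt (m i : Nat) (h : m.testBit i = true) : m ^^^ 2 ^ i < m := by
  apply Nat.lt_of_testBit i (xor_bit_false m i h) h
  intro j hj
  rw [Nat.testBit_xor, Nat.testBit_two_pow]
  have : decide (i = j) = false := by simp; omega
  simp [this]

theorem reach_lt {k : Int} {ds : List (Int × Int)} {p : Nat} (h : ReachP k ds p) :
    p < 2 ^ ds.length := by
  induction h with
  | zero => exact Nat.pow_pos (by norm_num)
  | step p i _ hi _ _ ih =>
    rw [Nat.one_shiftLeft]
    exact Nat.or_lt_two_pow ih (Nat.pow_lt_pow_right (by norm_num) hi)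

-- adding one bit = adding the corresponding dungeon to the selection (up to permutation)
theorem sel_or : ∀ (ds : List (Int × Int)) (i m : Nat), i < ds.length → m.testBit i = false →
    (sel (m ||| (1 <<< i)) ds).Perm (ds.getD i (0, 0) :: sel m ds) := by
  intro ds
  induction ds with
  | nil => intro i m hi _; simp at hi
  | cons d rest ih =>
    intro i m hi hb
    rw [Nat.one_shiftLeft]
    cases i with
    | zero =>
      have hpow : (2 : Nat) ^ 0 = 1 := rfl
      rw [hpow]
      obtain ⟨h1, h2⟩ := or_one_mod m hb
      have hsel1 : sel (m ||| 1) (d :: rest) = d :: sel (m / 2) rest := by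
        simp only [sel, or_one_div]
        rw [if_pos h1]
      have hsel2 : sel m (d :: rest) = sel (m / 2) rest := by
        simp only [sel]
        rw [if_neg (by omega)]
      rw [hsel1, hsel2, List.getD_cons_zero]
    | succ i =>
      have hrec := ih i (m / 2) (by simpa using hi) (by rw [← Nat.testBit_div_two] at hb; exact hb)
      rw [Nat.one_shiftLeft] at hrec
      simp only [sel, or_pow_succ_mod, or_pow_succ_div, List.getD_cons_succ]
      by_cases hm : m % 2 = 1
      · rw [if_pos hm, if_pos hm]
        exact (hrec.cons d).trans (List.Perm.swap _ _ _)
      · rw [if_neg hm, if_neg hm]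
        exact hrec

-- Feas of a snoc
theorem costs_cons (a : Int × Int) (s : List (Int × Int)) : costs (a :: s) = a.2 + costs s := by
  simp [costs]

theorem feas_snoc_iff : ∀ (s : List (Int × Int)) (k : Int) (d : Int × Int),
    Feas k (s ++ [d]) ↔ Feas k s ∧ d.1 ≤ k - costs s := by
  intro s
  induction s with
  | nil =>
    intro k d
    show (k ≥ d.1 ∧ True) ↔ (True ∧ d.1 ≤ k - costs [])
    have hc : costs ([] : List (Int × Int)) = 0 := rfl
    rw [hc]
    constructor
    · rintro ⟨h, _⟩; exact ⟨trivial, by omega⟩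
    · rintro ⟨_, h⟩; exact ⟨by omega, trivial⟩
  | cons a s ih =>
    intro k d
    show (k ≥ a.1 ∧ Feas (k - a.2) (s ++ [d])) ↔ ((k ≥ a.1 ∧ Feas (k - a.2) s) ∧ d.1 ≤ k - costs (a :: s))
    rw [ih, costs_cons]
    constructor
    · rintro ⟨h1, h2, h3⟩; exact ⟨⟨h1, h2⟩, by omega⟩
    · rintro ⟨⟨h1, h2⟩, h3⟩; exact ⟨h1, h2, by omega⟩

theorem costs_perm {s t : List (Int × Int)} (h : s.Perm t) : costs s = costs t :=
  List.Perm.sum_eq (h.map Prod.snd)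

-- reachable mask ⇒ some feasible clearing order of its dungeons
theorem reach_to_seq {k : Int} {ds : List (Int × Int)} {p : Nat} (h : ReachP k ds p) :
    ∃ s, s.Perm (sel p ds) ∧ Feas k s := by
  induction h with
  | zero => exact ⟨[], by rw [sel_zero], trivial⟩
  | step p i hp hi hb hr ih =>
    obtain ⟨s, hs, hf⟩ := ih
    refine ⟨s ++ [ds.getD i (0, 0)], ?_, ?_⟩
    · exact (List.perm_append_singleton _ _).trans ((hs.cons _).trans (sel_or ds i p hi hb).symm)
    · rw [feas_snoc_iff]
      refine ⟨hf, ?_⟩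
      have : costs s = costSum p ds := costs_perm hs
      rw [this]
      exact hr

-- feasible clearing order of a mask's dungeons ⇒ the mask is reachable
theorem seq_to_reach {k : Int} {ds : List (Int × Int)} :
    ∀ (m : Nat), m < 2 ^ ds.length → ∀ (s : List (Int × Int)), s.Perm (sel m ds) → Feas k s →
      ReachP k ds m := by
  intro m
  induction m using Nat.strong_induction_on with
  | _ m ihm =>
    intro hm s hs hf
    by_cases h0 : m = 0
    · subst h0; exact ReachP.zero
    · rcases List.eq_nil_or_concat s with rfl | ⟨s', d, rfl⟩
      · have hnil : sel m ds = [] := List.perm_nil.mp hs.symm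
        exact absurd (sel_eq_nil ds m hm hnil) h0
      · rw [List.concat_eq_append] at hs hf
        have hd : d ∈ sel m ds := hs.subset (by simp)
        obtain ⟨i, hi, hb, hg⟩ := mem_sel ds m d hd
        have ha := xor_bit_false m i hb
        have hor := xor_bit_or m i hb
        have hlt := xor_bit_lt m i hb
        have hperm : (sel m ds).Perm (d :: sel (m ^^^ 2 ^ i) ds) := by
          have := sel_or ds i (m ^^^ 2 ^ i) hi ha
          rw [Nat.one_shiftLeft, hor, hg] at this
          exact this
        have hs' : s'.Perm (sel (m ^^^ 2 ^ i) ds) :=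
          ((List.perm_append_singleton d s').symm.trans (hs.trans hperm)).cons_inv
        obtain ⟨hfs, hreq⟩ := (feas_snoc_iff s' k d).mp hf
        have hR : ReachP k ds (m ^^^ 2 ^ i) :=
          ihm _ hlt (lt_trans hlt hm) s' hs' hfs
        have := ReachP.step (k := k) (ds := ds) (m ^^^ 2 ^ i) i hR hi ha
          (by rw [hg]
              show d.1 ≤ k - costs (sel (m ^^^ 2 ^ i) ds)
              rw [← costs_perm hs']
              exact hreq)
        rw [Nat.one_shiftLeft, hor] at this
        exact this

-- every sub-multiset of ds is sel of some mask
theorem sublist_sel : ∀ {u ds : List (Int × Int)}, u.Sublist ds →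
    ∃ m, m < 2 ^ ds.length ∧ sel m ds = u := by
  intro u ds h
  induction h with
  | slnil => exact ⟨0, by norm_num, rfl⟩
  | @cons l₁ l₂ d h ih =>
    obtain ⟨m, hm, hsel⟩ := ih
    refine ⟨2 * m, ?_, ?_⟩
    · simp only [List.length_cons, pow_succ]; omega
    · simp only [sel]
      rw [if_neg (by omega)]
      rw [Nat.mul_div_cancel_left m (by norm_num)]
      exact hsel
  | @cons₂ l₁ l₂ d h ih =>
    obtain ⟨m, hm, hsel⟩ := ih
    refine ⟨2 * m + 1, ?_, ?_⟩
    · simp only [List.length_cons, pow_succ]; omega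
    · simp only [sel]
      rw [if_pos (by omega)]
      have : (2 * m + 1) / 2 = m := by omega
      rw [this, hsel]

theorem subperm_sel {s ds : List (Int × Int)} (h : s.Subperm ds) :
    ∃ m, m < 2 ^ ds.length ∧ s.Perm (sel m ds) := by
  obtain ⟨u, hu, hsub⟩ := h
  obtain ⟨m, hm, hsel⟩ := sublist_sel hsub
  exact ⟨m, hm, (hu.symm.trans (hsel ▸ List.Perm.refl u)).symm.symm⟩

theorem sublist_append_perm : ∀ {u v : List (Int × Int)}, u.Sublist v →
    ∃ t, (u ++ t).Perm v := by
  intro u v h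
  induction h with
  | slnil => exact ⟨[], by simp⟩
  | @cons l₁ l₂ a h ih =>
    obtain ⟨t, ht⟩ := ih
    exact ⟨a :: t, List.perm_middle.trans (ht.cons a)⟩
  | @cons₂ l₁ l₂ a h ih =>
    obtain ⟨t, ht⟩ := ih
    exact ⟨t, by simpa using ht.cons a⟩

theorem subperm_append {s ds : List (Int × Int)} (h : s.Subperm ds) :
    ∃ t, (s ++ t).Perm ds := by
  obtain ⟨u, hu, hsub⟩ := h
  obtain ⟨t, ht⟩ := sublist_append_perm hsub
  exact ⟨t, (hu.symm.append_right t).trans ht⟩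

-- ---------- evaluation of Source B's two inner loops ----------
theorem fat_eval : ∀ (ds : List (Int × Int)) (off : Nat) (m : Nat) (k : Int),
    (ds.zipIdx off).foldl (fun f di => if m.testBit di.2 then f - di.1.2 else f) k
      = k - costSum (m >>> off) ds := by
  intro ds
  induction ds with
  | nil => intro off m k; simp [costSum, sel]
  | cons d rest ih =>
    intro off m k
    rw [List.zipIdx_cons]
    simp only [List.foldl_cons]
    have hdiv : m >>> (off + 1) = (m >>> off) / 2 := Nat.shiftRight_succ m off
    have hcs : costSum (m >>> off) (d :: rest)
        = (if (m >>> off) % 2 = 1 then d.2 + costSum ((m >>> off) / 2) rest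
           else costSum ((m >>> off) / 2) rest) := by
      simp only [costSum, sel]
      split <;> simp
    by_cases hb : m.testBit off = true
    · rw [if_pos hb]
      have hm2 : (m >>> off) % 2 = 1 := by
        have h' : (m >>> off).testBit 0 = true := by
          rw [Nat.testBit_shiftRight]; simpa using hb
        rw [Nat.testBit_zero] at h'
        exact of_decide_eq_true h'
      rw [ih (off + 1) m (k - d.2), hdiv, hcs, if_pos hm2]
      ring
    · rw [if_neg hb]
      have hm2 : ¬ (m >>> off) % 2 = 1 := by
        have hb' : m.testBit off = false := by simpa using hb
        have h' : (m >>> off).testBit 0 = false := by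
          rw [Nat.testBit_shiftRight]; simpa using hb'
        rw [Nat.testBit_zero] at h'
        simpa using of_decide_eq_false h'
      rw [ih (off + 1) m k, hdiv, hcs, if_neg hm2]

theorem getD_set_true (r : List Bool) (i j : Nat) :
    ((r.set i true).getD j false = true) ↔ (r.getD j false = true ∨ (j = i ∧ j < r.length)) := by
  rw [List.getD_eq_getElem?_getD, List.getD_eq_getElem?_getD, List.getElem?_set]
  by_cases hij : i = j
  · subst hij
    by_cases hl : i < r.length
    · rw [if_pos rfl, if_pos hl]
      constructor
      · intro _; exact Or.inr ⟨rfl, hl⟩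
      · intro _; rfl
    · rw [if_pos rfl, if_neg hl]
      constructor
      · intro h; simp at h
      · rintro (h | ⟨_, h2⟩)
        · exfalso
          apply hl
          by_contra hge
          rw [List.getElem?_eq_none (by omega)] at h
          simp at h
        · omega
  · rw [if_neg hij]
    constructor
    · intro h; exact Or.inl h
    · rintro (h | ⟨h1, h2⟩)
      · exact h
      · exact absurd h1.symm hij

theorem setfold_len : ∀ (l : List ((Int × Int) × Nat)) (r : List Bool) (m : Nat) (fat : Int),
    (l.foldl (fun r di => if m.testBit di.2 = false ∧ di.1.1 ≤ fat
        then r.set (m ||| (1 <<< di.2)) true else r) r).length = r.length := by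
  intro l
  induction l with
  | nil => intro r m fat; rfl
  | cons a l ih =>
    intro r m fat
    simp only [List.foldl_cons]
    rw [ih]
    split <;> simp

theorem set_eval : ∀ (ds : List (Int × Int)) (off : Nat) (r : List Bool) (m : Nat) (fat : Int) (j : Nat),
    (((ds.zipIdx off).foldl (fun r di => if m.testBit di.2 = false ∧ di.1.1 ≤ fat
        then r.set (m ||| (1 <<< di.2)) true else r) r).getD j false = true)
    ↔ (r.getD j false = true ∨ ∃ i, i < ds.length ∧ m.testBit (off + i) = false ∧
        (ds.getD i (0, 0)).1 ≤ fat ∧ j = m ||| (1 <<< (off + i)) ∧ j < r.length) := by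
  intro ds
  induction ds with
  | nil => intro off r m fat j; simp
  | cons d rest ih =>
    intro off r m fat j
    rw [List.zipIdx_cons]
    simp only [List.foldl_cons]
    by_cases hc : m.testBit off = false ∧ d.1 ≤ fat
    · rw [if_pos hc]
      rw [ih (off + 1) (r.set (m ||| (1 <<< off)) true) m fat j]
      rw [getD_set_true]
      rw [List.length_set]
      constructor
      · rintro (((h | ⟨rfl, hl⟩) ) | ⟨i, hi, hb, hg, rfl, hl⟩)
        · exact Or.inl h
        · exact Or.inr ⟨0, by simp, by simpa using hc.1, by simpa using hc.2, by simp, hl⟩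
        · exact Or.inr ⟨i + 1, by simpa using hi, by rw [show off + 1 + i = off + (i + 1) by omega] at hb; exact hb,
            by simpa using hg, by rw [show off + 1 + i = off + (i + 1) by omega], hl⟩
      · rintro (h | ⟨i, hi, hb, hg, rfl, hl⟩)
        · exact Or.inl (Or.inl h)
        · cases i with
          | zero =>
            exact Or.inl (Or.inr ⟨by simp, hl⟩)
          | succ i =>
            refine Or.inr ⟨i, by simpa using hi, ?_, by simpa using hg, ?_, hl⟩
            · rw [show off + 1 + i = off + (i + 1) by omega]; exact hb
            · rw [show off + 1 + i = off + (i + 1) by omega]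
    · rw [if_neg hc]
      rw [ih (off + 1) r m fat j]
      constructor
      · rintro (h | ⟨i, hi, hb, hg, rfl, hl⟩)
        · exact Or.inl h
        · exact Or.inr ⟨i + 1, by simpa using hi, by rw [show off + 1 + i = off + (i + 1) by omega] at hb; exact hb,
            by simpa using hg, by rw [show off + 1 + i = off + (i + 1) by omega], hl⟩
      · rintro (h | ⟨i, hi, hb, hg, rfl, hl⟩)
        · exact Or.inl h
        · cases i with
          | zero =>
            exfalso
            apply hc
            constructor
            · simpa using hb
            · simpa using hg
          | succ i =>
            refine Or.inr ⟨i, by simpa using hi, ?_, by simpa using hg, ?_, hl⟩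
            · rw [show off + 1 + i = off + (i + 1) by omega]; exact hb
            · rw [show off + 1 + i = off + (i + 1) by omega]

-- ---------- the main loop invariant ----------
def stB (k : Int) (ds : List (Int × Int)) (t : Nat) : List Bool × Int :=
  (List.range t).foldl (altStep k ds) ((List.replicate (2 ^ ds.length) false).set 0 true, 0)

def charB (k : Int) (ds : List (Int × Int)) (t j : Nat) : Prop :=
  j = 0 ∨ ∃ p i, p < t ∧ ReachP k ds p ∧ i < ds.length ∧ p.testBit i = false ∧
    (ds.getD i (0, 0)).1 ≤ k - costSum p ds ∧ j = p ||| (1 <<< i)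

theorem char_reach {k : Int} {ds : List (Int × Int)} {t j : Nat} (h : charB k ds t j) :
    ReachP k ds j := by
  rcases h with rfl | ⟨p, i, _, hp, hi, hb, hr, rfl⟩
  · exact ReachP.zero
  · exact ReachP.step p i hp hi hb hr

theorem reach_char {k : Int} {ds : List (Int × Int)} {t : Nat} (h : ReachP k ds t) :
    charB k ds t t := by
  cases h with
  | zero => exact Or.inl rfl
  | step p i hp hi hb hr =>
    exact Or.inr ⟨p, i, lt_or_bit p i hb, hp, hi, hb, hr, rfl⟩

theorem stB_inv (k : Int) (ds : List (Int × Int)) : ∀ (t : Nat),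
    ((stB k ds t).1.length = 2 ^ ds.length) ∧
    (∀ j, ((stB k ds t).1.getD j false = true ↔ charB k ds t j)) ∧
    (0 ≤ (stB k ds t).2) ∧
    (∀ j, j < t → ReachP k ds j → (popcnt j : Int) ≤ (stB k ds t).2) ∧
    ((stB k ds t).2 = 0 ∨ ∃ j, j < t ∧ ReachP k ds j ∧ (stB k ds t).2 = (popcnt j : Int)) := by
  intro t
  induction t with
  | zero =>
    refine ⟨by simp [stB], ?_, le_rfl, by omega, Or.inl rfl⟩
    intro j
    have hpos : 0 < 2 ^ ds.length := Nat.pow_pos (by norm_num)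
    show ((List.replicate (2 ^ ds.length) false).set 0 true).getD j false = true ↔ charB k ds 0 j
    rw [getD_set_true]
    have hrep : (List.replicate (2 ^ ds.length) false).getD j false = false := by
      rw [List.getD_eq_getElem?_getD, List.getElem?_replicate]
      split <;> rfl
    rw [hrep]
    simp only [List.length_replicate]
    unfold charB
    constructor
    · rintro (h | ⟨rfl, _⟩)
      · simp at h
      · exact Or.inl rfl
    · rintro (rfl | ⟨p, i, hp, _⟩)
      · exact Or.inr ⟨rfl, hpos⟩
      · omega
  | succ t ih =>
    obtain ⟨hlen, hchar, hpos, hub, hatt⟩ := ih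
    have hst : stB k ds (t + 1) = altStep k ds (stB k ds t) t := by
      unfold stB
      rw [List.range_succ, List.foldl_append, List.foldl_cons, List.foldl_nil]
    by_cases hb : (stB k ds t).1.getD t false = true
    · -- reach[t] is true: t is reachable and its successors get marked
      have hR : ReachP k ds t := char_reach ((hchar t).mp hb)
      have htlt : t < 2 ^ ds.length := reach_lt hR
      have hfat : (ds.zipIdx.foldl (fun f di => if Nat.testBit t di.2 then f - di.1.2 else f) k)
          = k - costSum t ds := by
        have := fat_eval ds 0 t k
        rw [Nat.shiftRight_zero] at this
        exact this
      have hstep : stB k ds (t + 1)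
          = (ds.zipIdx.foldl (fun r di => if Nat.testBit t di.2 = false ∧ di.1.1 ≤ (k - costSum t ds)
                then r.set (t ||| (1 <<< di.2)) true else r) (stB k ds t).1,
             if (popcnt t : Int) > (stB k ds t).2 then (popcnt t : Int) else (stB k ds t).2) := by
        rw [hst]
        unfold altStep
        rw [if_pos hb]
        rw [hfat]
      refine ⟨?_, ?_, ?_, ?_, ?_⟩
      · rw [hstep]
        exact (setfold_len _ _ _ _).trans hlen
      · intro j
        rw [hstep]
        show (_ = true) ↔ _
        rw [set_eval ds 0 (stB k ds t).1 t (k - costSum t ds) j]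
        rw [hchar j, hlen]
        unfold charB
        constructor
        · rintro (h | ⟨i, hi, hbi, hg, rfl, _⟩)
          · rcases h with rfl | ⟨p, i, hp, rest⟩
            · exact Or.inl rfl
            · exact Or.inr ⟨p, i, by omega, rest⟩
          · exact Or.inr ⟨t, i, by omega, hR, hi, by simpa using hbi, hg, by simp⟩
        · rintro (rfl | ⟨p, i, hp, hRp, hi, hbi, hg, rfl⟩)
          · exact Or.inl (Or.inl rfl)
          · by_cases hpt : p = t
            · subst hpt
              refine Or.inr ⟨i, hi, by simpa using hbi, hg, by simp, ?_⟩
              rw [Nat.one_shiftLeft]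
              exact Nat.or_lt_two_pow htlt (Nat.pow_lt_pow_right (by norm_num) hi)
            · exact Or.inl (Or.inr ⟨p, i, by omega, hRp, hi, hbi, hg, rfl⟩)
      · rw [hstep]
        show (0 : Int) ≤ _
        split
        · positivity
        · exact hpos
      · intro j hj hRj
        rw [hstep]
        show _ ≤ if (popcnt t : Int) > (stB k ds t).2 then (popcnt t : Int) else (stB k ds t).2
        rcases Nat.lt_succ_iff_lt_or_eq.mp hj with hj | rfl
        · have := hub j hj hRj
          split <;> omega
        · split <;> omega
      · rw [hstep]
        show (if (popcnt t : Int) > (stB k ds t).2 then (popcnt t : Int) else (stB k ds t).2) = 0 ∨ _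
        split
        · exact Or.inr ⟨t, by omega, hR, rfl⟩
        · rcases hatt with h0 | ⟨j, hj, hRj, he⟩
          · exact Or.inl h0
          · exact Or.inr ⟨j, by omega, hRj, he⟩
    · -- reach[t] is false: t is unreachable, nothing changes
      have hnR : ¬ ReachP k ds t := fun hR => hb ((hchar t).mpr (reach_char hR))
      have hstep : stB k ds (t + 1) = stB k ds t := by
        rw [hst]
        unfold altStep
        rw [if_neg hb]
      rw [hstep]
      refine ⟨hlen, ?_, hpos, ?_, ?_⟩
      · intro j
        rw [hchar j]
        unfold charB
        constructor
        · rintro (rfl | ⟨p, i, hp, rest⟩)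
          · exact Or.inl rfl
          · exact Or.inr ⟨p, i, by omega, rest⟩
        · rintro (rfl | ⟨p, i, hp, hRp, rest⟩)
          · exact Or.inl rfl
          · by_cases hpt : p = t
            · exact absurd (hpt ▸ hRp) hnR
            · exact Or.inr ⟨p, i, by omega, hRp, rest⟩
      · intro j hj hRj
        rcases Nat.lt_succ_iff_lt_or_eq.mp hj with hj | rfl
        · exact hub j hj hRj
        · exact absurd hRj hnR
      · rcases hatt with h0 | ⟨j, hj, hRj, he⟩
        · exact Or.inl h0
        · exact Or.inr ⟨j, by omega, hRj, he⟩

-- ===== VERDICT (by name: the statement is the Claim_ definition above) =====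
theorem solution_spec : Claim_equal_solution := by
  intro k ds _
  unfold Spec_solution solution
  obtain ⟨hlen, hchar, hpos, hub, hatt⟩ := stB_inv k ds (2 ^ ds.length)
  have halt : solution_alt k ds = (stB k ds (2 ^ ds.length)).2 := rfl
  rw [outer_eval _ k 0 le_rfl, halt]
  apply le_antisymm
  · apply foldlMax_le _ _ 0 hpos
    intro data hd
    have hperm := perm_of_mem_permsA ds.length ds data le_rfl hd
    obtain ⟨s, hsub, hf, hl⟩ := runC_cleared data k
    have hsp : s.Subperm ds := hsub.subperm.trans hperm.subperm
    obtain ⟨m, hm, hms⟩ := subperm_sel hsp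
    have hR : ReachP k ds m := seq_to_reach m hm s hms hf
    have hbd := hub m hm hR
    have hpc : (popcnt m : Int) = (s.length : Int) := by
      rw [popcnt_sel ds m hm, hms.length_eq]
    rw [← hl, ← hpc]
    exact hbd
  · rcases hatt with h0 | ⟨j, hj, hR, hbest⟩
    · rw [h0]
      exact foldlMax_init_le _ _ _
    · obtain ⟨s, hs, hf⟩ := reach_to_seq hR
      have hsp : s.Subperm ds := ⟨sel j ds, hs.symm, sel_sublist ds j⟩
      obtain ⟨t, ht⟩ := subperm_append hsp
      have hmem := mem_permsA_of_perm ds.length ds (s ++ t) le_rfl ht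
      have h1 : (s.length : Int) ≤ runC k (s ++ t) := feas_le_runC_append s k t hf
      have h2 := foldlMax_elem_le (fun data => runC k data) (permsA ds) 0 (s ++ t) hmem
      have hpc : (popcnt j : Int) = (s.length : Int) := by
        rw [popcnt_sel ds j (reach_lt hR), hs.length_eq]
      rw [hbest, hpc]
      exact le_trans h1 h2
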